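-- pv_equiv track=rewrite | github.com/Arthur-Dauphole/Projet-BRAIN | Arthur_2/BRAIN_PROJECT/modules/transformation_detector.py | _rotate_blob
-- ===== SOURCE A (Python) =====
-- def _rotate_blob(pixels: frozenset, angle: int) -> frozenset:
--     """Rotate normalized blob pixels and re-normalize."""
--     if not pixels:
--         return frozenset()
--
--     pixels_list = list(pixels)
--     h = max(p[0] for p in pixels_list) + 1
--     w = max(p[1] for p in pixels_list) + 1
--
--     rotated = []
--     for r, c in pixels_list:
--         if angle == 90:
--             new_r, new_c = c, h - 1 - r
--         elif angle == 180:
--             new_r, new_c = h - 1 - r, w - 1 - c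
--         elif angle == 270:
--             new_r, new_c = w - 1 - c, r
--         else:
--             new_r, new_c = r, c
--         rotated.append((new_r, new_c))
--
--     # Re-normalize
--     if rotated:
--         min_r = min(p[0] for p in rotated)
--         min_c = min(p[1] for p in rotated)
--         return frozenset((p[0] - min_r, p[1] - min_c) for p in rotated)
--     return frozenset()
-- ===== SOURCE B (Python) =====
-- def _rotate_blob(pixels: frozenset, angle: int) -> frozenset:
--     """Rotate normalized blob pixels and re-normalize (closed-form, single bbox pass)."""
--     if not pixels:
--         return frozenset()
--     min_r = max_r = min_c = max_c = None
--     for r, c in pixels: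
--         if min_r is None:
--             min_r = max_r = r
--             min_c = max_c = c
--         else:
--             if r < min_r: min_r = r
--             if r > max_r: max_r = r
--             if c < min_c: min_c = c
--             if c > max_c: max_c = c
--     if angle == 90:
--         return frozenset((c - min_c, max_r - r) for r, c in pixels)
--     if angle == 180:
--         return frozenset((max_r - r, max_c - c) for r, c in pixels)
--     if angle == 270:
--         return frozenset((max_c - c, r - min_r) for r, c in pixels)
--     return frozenset((r - min_r, c - min_c) for r, c in pixels)
-- ===== Notes on version B (the rewrite author's own statement) =====
-- stated objective: simpler
-- what changed: B computes the bounding box (min/max row and column) of the input in one pass and builds the result set with a single comprehension using an angle-specific closed form that already incorporates the re-normalization, eliminating A's intermediate rotated list, its h/w variables and its separate second min-pass over the rotated list.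
import Mathlib
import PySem

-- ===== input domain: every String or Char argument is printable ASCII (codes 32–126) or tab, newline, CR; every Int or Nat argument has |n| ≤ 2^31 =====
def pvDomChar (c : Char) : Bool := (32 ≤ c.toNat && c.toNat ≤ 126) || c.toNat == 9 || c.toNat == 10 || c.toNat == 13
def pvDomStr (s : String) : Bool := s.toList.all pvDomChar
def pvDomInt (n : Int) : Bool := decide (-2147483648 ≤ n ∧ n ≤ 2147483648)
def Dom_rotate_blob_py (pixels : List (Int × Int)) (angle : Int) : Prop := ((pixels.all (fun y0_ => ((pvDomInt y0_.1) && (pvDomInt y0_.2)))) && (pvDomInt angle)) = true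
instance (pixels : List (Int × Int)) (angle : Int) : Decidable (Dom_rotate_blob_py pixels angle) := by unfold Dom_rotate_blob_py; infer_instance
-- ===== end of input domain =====

-- B replaces A's rotate-then-re-normalize two-pass pipeline by one bounding-box pass plus a
-- single closed-form comprehension per angle (objective: simpler); return values are equal.

-- ===== PORT A =====
-- literal port of A: h/w from the maxima, build the `rotated` list, then re-normalize by the
-- minima of `rotated` (frozenset ported as PySem.Set of the distinct pixels).
def rotate_blob_py (pixels : List (Int × Int)) (angle : Int) : List (Int × Int) :=
  match pixels with
  | [] => []
  | p :: ps =>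
    let h : Int := ps.foldl (fun a q => max a q.1) p.1 + 1
    let w : Int := ps.foldl (fun a q => max a q.2) p.2 + 1
    let f : Int × Int → Int × Int := fun q =>
      if angle = 90 then (q.2, h - 1 - q.1)
      else if angle = 180 then (h - 1 - q.1, w - 1 - q.2)
      else if angle = 270 then (w - 1 - q.2, q.1)
      else (q.1, q.2)
    match (p :: ps).map f with
    | [] => PySem.Set.ofList []          -- the `if rotated:` false branch (unreachable here)
    | q :: qs =>
      let min_r : Int := qs.foldl (fun a x => min a x.1) q.1
      let min_c : Int := qs.foldl (fun a x => min a x.2) q.2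
      PySem.Set.ofList ((q :: qs).map (fun x => (x.1 - min_r, x.2 - min_c)))

-- ===== PORT B =====
-- literal port of B: one fold computing (min_r, max_r, min_c, max_c), then one comprehension
-- per angle with the closed form that already includes the normalization.
def rotate_blob_py_alt (pixels : List (Int × Int)) (angle : Int) : List (Int × Int) :=
  match pixels with
  | [] => []
  | p :: ps =>
    let b : Int × Int × Int × Int :=
      ps.foldl (fun (s : Int × Int × Int × Int) q =>
        (min s.1 q.1, max s.2.1 q.1, min s.2.2.1 q.2, max s.2.2.2 q.2))
        (p.1, p.1, p.2, p.2)
    let min_r := b.1; let max_r := b.2.1; let min_c := b.2.2.1; let max_c := b.2.2.2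
    if angle = 90 then PySem.Set.ofList ((p :: ps).map (fun q => (q.2 - min_c, max_r - q.1)))
    else if angle = 180 then PySem.Set.ofList ((p :: ps).map (fun q => (max_r - q.1, max_c - q.2)))
    else if angle = 270 then PySem.Set.ofList ((p :: ps).map (fun q => (max_c - q.2, q.1 - min_r)))
    else PySem.Set.ofList ((p :: ps).map (fun q => (q.1 - min_r, q.2 - min_c)))

-- ===== PRECONDITION & SPEC =====
def Spec_rotate_blob_py (pixels : List (Int × Int)) (angle : Int) (out : List (Int × Int)) : Prop := out = rotate_blob_py_alt pixels angle
instance (pixels : List (Int × Int)) (angle : Int) (out : List (Int × Int)) : Decidable (Spec_rotate_blob_py pixels angle out) := by unfold Spec_rotate_blob_py; infer_instance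

-- ===== CLAIM (what is proved, stated in full; the proofs are below) =====
def Claim_equal_rotate_blob_py : Prop := ∀ (pixels : List (Int × Int)) (angle : Int), Dom_rotate_blob_py pixels angle → Spec_rotate_blob_py pixels angle (rotate_blob_py pixels angle)

-- ===== LEMMAS AND PROOFS =====

-- the 4-tuple fold of port B splits into four independent folds
theorem pvFold4 (ps : List (Int × Int)) (a b c d : Int) :
    ps.foldl (fun (s : Int × Int × Int × Int) q =>
        (min s.1 q.1, max s.2.1 q.1, min s.2.2.1 q.2, max s.2.2.2 q.2)) (a, b, c, d)
    = (ps.foldl (fun s q => min s q.1) a, ps.foldl (fun s q => max s q.1) b,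
       ps.foldl (fun s q => min s q.2) c, ps.foldl (fun s q => max s q.2) d) := by
  induction ps generalizing a b c d with
  | nil => rfl
  | cons q qs ih => simp only [List.foldl]; exact ih _ _ _ _

-- folding min over (k - g q) is k minus folding max over g q
theorem pvMinSub (g : Int × Int → Int) (ps : List (Int × Int)) (k x : Int) :
    ps.foldl (fun a q => min a (k - g q)) (k - x) = k - ps.foldl (fun a q => max a (g q)) x := by
  induction ps generalizing x with
  | nil => rfl
  | cons q qs ih =>
    simp only [List.foldl]
    rw [show min (k - x) (k - g q) = k - max x (g q) by omega, ih]

theorem pvCase90 (p : Int × Int) (ps : List (Int × Int)) :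
    rotate_blob_py (p :: ps) 90 = rotate_blob_py_alt (p :: ps) 90 := by
  simp only [rotate_blob_py, rotate_blob_py_alt, List.map_cons, pvFold4]
  norm_num
  simp only [List.foldl_map, Function.comp_def]
  rw [pvMinSub (fun q => q.1) ps (List.foldl (fun a q => max a q.1) p.1 ps) p.1]
  simp only [sub_self, sub_zero]

theorem pvCase180 (p : Int × Int) (ps : List (Int × Int)) :
    rotate_blob_py (p :: ps) 180 = rotate_blob_py_alt (p :: ps) 180 := by
  simp only [rotate_blob_py, rotate_blob_py_alt, List.map_cons, pvFold4]
  norm_num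
  simp only [List.foldl_map, Function.comp_def]
  rw [pvMinSub (fun q => q.1) ps (List.foldl (fun a q => max a q.1) p.1 ps) p.1,
      pvMinSub (fun q => q.2) ps (List.foldl (fun a q => max a q.2) p.2 ps) p.2]
  simp only [sub_self, sub_zero]

theorem pvCase270 (p : Int × Int) (ps : List (Int × Int)) :
    rotate_blob_py (p :: ps) 270 = rotate_blob_py_alt (p :: ps) 270 := by
  simp only [rotate_blob_py, rotate_blob_py_alt, List.map_cons, pvFold4]
  norm_num
  simp only [List.foldl_map, Function.comp_def]
  rw [pvMinSub (fun q => q.2) ps (List.foldl (fun a q => max a q.2) p.2 ps) p.2]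
  simp only [sub_self, sub_zero]

theorem pvCaseElse (p : Int × Int) (ps : List (Int × Int)) (angle : Int)
    (h90 : ¬ angle = 90) (h180 : ¬ angle = 180) (h270 : ¬ angle = 270) :
    rotate_blob_py (p :: ps) angle = rotate_blob_py_alt (p :: ps) angle := by
  simp only [rotate_blob_py, rotate_blob_py_alt, List.map_cons, if_neg h90, if_neg h180,
    if_neg h270, pvFold4]
  simp only [Prod.mk.eta, List.map_id_fun', id]

-- ===== VERDICT (by name: the statement is the Claim_ definition above) =====
theorem rotate_blob_py_spec : Claim_equal_rotate_blob_py := by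
  intro pixels angle _
  unfold Spec_rotate_blob_py
  cases pixels with
  | nil => rfl
  | cons p ps =>
    by_cases h90 : angle = 90
    · subst h90; exact pvCase90 p ps
    · by_cases h180 : angle = 180
      · subst h180; exact pvCase180 p ps
      · by_cases h270 : angle = 270
        · subst h270; exact pvCase270 p ps
        · exact pvCaseElse p ps angle h90 h180 h270
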